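-- pv_equiv track=rewrite | github.com/AnandRaj-7/Hello-World | list_product.py | count_zeros
-- ===== SOURCE A (Python) =====
-- def count_zeros(check):
--     count=0
--     for i in range(len(check)):
--         if(check[i]==0):
--             pos=i
--             count=count+1
--             if count==2 :
--                 return -2
--     if count==1 :
--         return pos
--     return -1
-- ===== SOURCE B (Python) =====
-- def count_zeros(check):
--     n = check.count(0)
--     if n >= 2:
--         return -2
--     if n == 1:
--         return check.index(0)
--     return -1
-- ===== Notes on version B (the rewrite author's own statement) =====
-- stated objective: idiomatic
-- what changed: Replaces A's hand-written index loop with running count, saved position and early return by two library calls: check.count(0) to classify the case, then check.index(0) for the single-zero position.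
import Mathlib
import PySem

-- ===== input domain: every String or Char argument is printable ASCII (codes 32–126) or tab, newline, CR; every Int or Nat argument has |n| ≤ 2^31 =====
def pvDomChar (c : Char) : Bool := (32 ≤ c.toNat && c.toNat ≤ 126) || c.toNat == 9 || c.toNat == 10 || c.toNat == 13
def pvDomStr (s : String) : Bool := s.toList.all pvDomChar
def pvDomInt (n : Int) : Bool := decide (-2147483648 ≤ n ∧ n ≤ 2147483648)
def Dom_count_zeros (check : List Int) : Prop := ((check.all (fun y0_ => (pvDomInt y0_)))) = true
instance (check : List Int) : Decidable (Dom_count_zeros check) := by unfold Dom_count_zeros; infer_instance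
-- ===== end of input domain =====

-- B replaces A's index loop with running count and early return by two library
-- calls (count then index); objective: idiomatic, same O(n) cost.

-- ===== PORT A =====
-- for i in range(len(check)) with state (count, pos); early 'return -2' when count hits 2
def count_zerosGo (check : List Int) (i : Nat) (count pos : Int) : Int :=
  if h : i < check.length then
    if PySem.List.pyGet? check (i : Int) = some 0 then
      -- pos = i; count = count + 1; if count == 2: return -2
      (if count + 1 == 2 then (-2) else count_zerosGo check (i + 1) (count + 1) (i : Int))
    else count_zerosGo check (i + 1) count pos
  else if count == 1 then pos else -1
termination_by check.length - i

def count_zeros (check : List Int) : Int := count_zerosGo check 0 0 0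

-- ===== PORT B =====
-- n = check.count(0); dispatch on n; check.index(0) only in the n == 1 branch,
-- where the element is present, so Python's ValueError is unreachable (getD default never used).
def count_zeros_alt (check : List Int) : Int :=
  let n := PySem.List.count check 0
  if 2 ≤ n then -2
  else if n == 1 then ((PySem.List.index? check 0).map (Int.ofNat)).getD (-1)
  else -1

-- ===== PRECONDITION & SPEC =====
def Spec_count_zeros (check : List Int) (out : Int) : Prop := out = count_zeros_alt check
instance (check : List Int) (out : Int) : Decidable (Spec_count_zeros check out) := by unfold Spec_count_zeros; infer_instance

-- ===== CLAIM =====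
def Claim_equal_count_zeros : Prop := ∀ (check : List Int), Dom_count_zeros check → Spec_count_zeros check (count_zeros check)

-- ===== LEMMAS AND PROOFS =====

-- once a first zero has been recorded (count = 1), the loop returns -2 iff a zero remains
lemma go_one (check : List Int) (i : Nat) (pos : Int) :
    count_zerosGo check i 1 pos =
      (if (check.drop i).count 0 = 0 then pos else -2) := by
  induction hn : check.length - i generalizing i pos with
  | zero =>
    have hge : check.length ≤ i := by omega
    rw [count_zerosGo]
    simp [List.drop_eq_nil_of_le hge, Nat.not_lt.mpr hge]
  | succ n ih =>
    have h : i < check.length := by omega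
    have hdrop : check.drop i = check[i] :: check.drop (i + 1) :=
      (List.getElem_cons_drop h).symm
    have hp : PySem.List.pyGet? check (i : Int) = some check[i] := by
      simp [List.getElem?_eq_getElem h]
    rw [count_zerosGo, dif_pos h, hp, hdrop]
    by_cases hz : check[i] = (0 : Int)
    · rw [if_pos (by rw [hz]), if_pos (by decide)]
      rw [hz, List.count_cons_self]
      simp
    · rw [if_neg (by simp [hz]), ih (i + 1) pos (by omega),
          List.count_cons_of_ne hz]

-- with no zero recorded yet, the loop's result is determined by the zero count and first index
lemma go_zero (check : List Int) (i : Nat) (pos : Int) :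
    count_zerosGo check i 0 pos =
      (if 2 ≤ (check.drop i).count 0 then -2
       else if (check.drop i).count 0 = 1 then
         (i : Int) + ((PySem.List.index? (check.drop i) 0).map (Int.ofNat)).getD (-1)
       else -1) := by
  induction hn : check.length - i generalizing i pos with
  | zero =>
    have hge : check.length ≤ i := by omega
    rw [count_zerosGo]
    simp [List.drop_eq_nil_of_le hge, Nat.not_lt.mpr hge]
  | succ n ih =>
    have h : i < check.length := by omega
    have hdrop : check.drop i = check[i] :: check.drop (i + 1) :=
      (List.getElem_cons_drop h).symm
    have hp : PySem.List.pyGet? check (i : Int) = some check[i] := by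
      simp [List.getElem?_eq_getElem h]
    rw [count_zerosGo, dif_pos h, hp, hdrop]
    by_cases hz : check[i] = (0 : Int)
    · rw [if_pos (by rw [hz]), if_neg (by decide)]
      rw [show ((0 : Int) + 1) = 1 from by norm_num, go_one check (i + 1) (i : Int)]
      rw [hz, PySem.List.index?_cons_self, List.count_cons_self]
      by_cases h0 : (check.drop (i + 1)).count 0 = 0
      · simp [h0]
      · rw [if_neg h0, if_pos (by omega)]
    · rw [if_neg (by simp [hz]), ih (i + 1) pos (by omega)]
      rw [PySem.List.index?_cons_of_ne _ hz, List.count_cons_of_ne hz]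
      by_cases h2 : 2 ≤ (check.drop (i + 1)).count 0
      · simp [h2]
      · rw [if_neg h2, if_neg h2]
        by_cases h1 : (check.drop (i + 1)).count 0 = 1
        · rw [if_pos h1, if_pos h1]
          have hmem : (0 : Int) ∈ check.drop (i + 1) := by
            rw [← List.count_pos_iff]; omega
          obtain ⟨k, hk⟩ := Option.isSome_iff_exists.mp
            ((PySem.List.index?_isSome_iff _ _).mpr hmem)
          rw [hk]
          simp
          ring
        · rw [if_neg h1, if_neg h1]

-- ===== VERDICT =====
theorem count_zeros_spec : Claim_equal_count_zeros := by
  intro check _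
  unfold Spec_count_zeros count_zeros count_zeros_alt
  rw [go_zero check 0 0]
  simp only [List.drop_zero, Nat.cast_zero, zero_add, PySem.List.count_eq]
  simp [beq_iff_eq]
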